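-- pv_equiv track=rewrite | github.com/PDinesen/AdventofCode | 2024/day14.py | find_top
-- ===== SOURCE A (Python) =====
-- def find_top(positions, rows):
--     for x, y in positions:
--         found = True
--         for r in range(1, rows):
--             for c in range(-rows, rows + 1):
--                 if (x + r, y + c) not in positions:
--                     found = False
--                     break
--             if not found:
--                 break
--         if found:
--             return True
--     return False
-- ===== SOURCE B (Python) =====
-- def find_top(positions, rows):
--     # Count distinct robots inside each candidate's triangle bounding box and
--     # compare with the box's area, instead of enumerating every required cell.
--     pts = set(positions)
--     need = max(rows - 1, 0) * max(2 * rows + 1, 0)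
--     return any(
--         sum(1 for px, py in pts
--             if x + 1 <= px <= x + rows - 1 and y - rows <= py <= y + rows) == need
--         for x, y in positions)
-- ===== Notes on version B (the rewrite author's own statement) =====
-- stated objective: alternative
-- what changed: Instead of enumerating every required cell of the (rows-1)x(2*rows+1) rectangle and testing membership in the positions list with manual breaks, B deduplicates the positions once and, for each candidate, counts the distinct points falling inside that rectangle and compares the count with the rectangle's area (a pigeonhole argument).
import Mathlib
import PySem

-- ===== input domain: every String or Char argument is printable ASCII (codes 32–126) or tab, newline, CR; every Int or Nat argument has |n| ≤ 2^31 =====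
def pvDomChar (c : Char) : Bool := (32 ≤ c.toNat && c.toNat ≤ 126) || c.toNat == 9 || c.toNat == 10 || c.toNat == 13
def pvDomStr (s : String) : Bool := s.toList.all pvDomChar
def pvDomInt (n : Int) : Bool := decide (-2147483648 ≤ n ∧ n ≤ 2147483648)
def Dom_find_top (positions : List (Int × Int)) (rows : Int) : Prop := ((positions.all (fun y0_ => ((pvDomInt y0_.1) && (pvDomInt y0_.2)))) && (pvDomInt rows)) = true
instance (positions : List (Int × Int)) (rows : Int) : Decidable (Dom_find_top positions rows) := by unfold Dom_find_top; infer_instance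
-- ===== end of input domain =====

-- B replaces the cell-by-cell membership scan with a dedup-and-count pigeonhole test (alternative algorithm, similar cost).

-- ===== PORT A =====
-- inner 'for c in range(-rows, rows+1)' with break: counts c upward, stops at the first missing cell
def pvLoopC (positions : List (Int × Int)) (x y r c hi : Int) : Bool :=
  if c < hi then
    if (x + r, y + c) ∈ positions then pvLoopC positions x y r (c + 1) hi else false
  else true
termination_by (hi - c).toNat
decreasing_by omega

-- 'for r in range(1, rows)' with 'if not found: break'
def pvLoopR (positions : List (Int × Int)) (rows x y r : Int) : Bool :=
  if r < rows then
    if pvLoopC positions x y r (-rows) (rows + 1) then pvLoopR positions rows x y (r + 1)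
    else false
  else true
termination_by (rows - r).toNat
decreasing_by omega

-- outer 'for x, y in positions' with early 'return True'
def pvGoA (positions : List (Int × Int)) (rows : Int) : List (Int × Int) → Bool
  | [] => false
  | p :: rest =>
      if pvLoopR positions rows p.1 p.2 1 then true else pvGoA positions rows rest

def find_top (positions : List (Int × Int)) (rows : Int) : Bool :=
  pvGoA positions rows positions

-- ===== PORT B =====
def find_top_alt (positions : List (Int × Int)) (rows : Int) : Bool :=
  let pts : PySem.Set (Int × Int) := PySem.Set.ofList positions
  let need : Int := max (rows - 1) 0 * max (2 * rows + 1) 0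
  positions.any (fun p =>
    List.foldl (fun acc q =>
        if p.1 + 1 ≤ q.1 ∧ q.1 ≤ p.1 + rows - 1 ∧ p.2 - rows ≤ q.2 ∧ q.2 ≤ p.2 + rows
        then acc + 1 else acc) (0 : Int) pts == need)

-- ===== PRECONDITION & SPEC =====
def Spec_find_top (positions : List (Int × Int)) (rows : Int) (out : Bool) : Prop := out = find_top_alt positions rows
instance (positions : List (Int × Int)) (rows : Int) (out : Bool) : Decidable (Spec_find_top positions rows out) := by unfold Spec_find_top; infer_instance

-- ===== CLAIM (what is proved, stated in full; the proofs are below) =====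
def Claim_equal_find_top : Prop := ∀ (positions : List (Int × Int)) (rows : Int), Dom_find_top positions rows → Spec_find_top positions rows (find_top positions rows)

-- ===== LEMMAS AND PROOFS =====

-- the rectangle of cells A demands around a candidate (x, y)
abbrev pvInRect (x y rows : Int) (q : Int × Int) : Prop :=
  x + 1 ≤ q.1 ∧ q.1 ≤ x + rows - 1 ∧ y - rows ≤ q.2 ∧ q.2 ≤ y + rows

noncomputable def pvRect (x y rows : Int) : Finset (Int × Int) :=
  Finset.Icc (x + 1) (x + rows - 1) ×ˢ Finset.Icc (y - rows) (y + rows)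

lemma pvMem_rect (x y rows : Int) (q : Int × Int) :
    q ∈ pvRect x y rows ↔ pvInRect x y rows q := by
  simp [pvRect, pvInRect, Finset.mem_product, Finset.mem_Icc, and_assoc]

lemma pvRect_card (x y rows : Int) :
    ((pvRect x y rows).card : Int) = max (rows - 1) 0 * max (2 * rows + 1) 0 := by
  have h1 : (Finset.Icc (x + 1) (x + rows - 1)).card = (rows - 1).toNat := by
    rw [Int.card_Icc]; congr 1; ring
  have h2 : (Finset.Icc (y - rows) (y + rows)).card = (2 * rows + 1).toNat := by
    rw [Int.card_Icc]; congr 1; ring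
  simp [pvRect, Finset.card_product, h1, h2]
  push_cast
  omega

lemma pvLoopC_iff (positions : List (Int × Int)) (x y r : Int) :
    ∀ (n : Nat) (c hi : Int), (hi - c).toNat ≤ n →
      (pvLoopC positions x y r c hi = true ↔
        ∀ c', c ≤ c' → c' < hi → (x + r, y + c') ∈ positions) := by
  intro n
  induction n with
  | zero =>
      intro c hi hn
      rw [pvLoopC, if_neg (by omega)]
      simp only [true_iff]
      intro c' h1 h2; omega
  | succ n ih =>
      intro c hi hn
      rw [pvLoopC]
      by_cases h1 : c < hi
      · rw [if_pos h1]
        by_cases h2 : (x + r, y + c) ∈ positions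
        · rw [if_pos h2, ih (c + 1) hi (by omega)]
          constructor
          · intro h c' hc1 hc2
            rcases eq_or_lt_of_le hc1 with rfl | hlt
            · exact h2
            · exact h c' (by omega) hc2
          · intro h c' hc1 hc2
            exact h c' (by omega) hc2
        · rw [if_neg h2]
          simp only [Bool.false_eq_true, false_iff]
          intro h
          exact h2 (h c (le_refl c) h1)
      · rw [if_neg h1]
        simp only [true_iff]
        intro c' hc1 hc2; omega

lemma pvLoopR_iff (positions : List (Int × Int)) (rows x y : Int) :
    ∀ (n : Nat) (r : Int), (rows - r).toNat ≤ n →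
      (pvLoopR positions rows x y r = true ↔
        ∀ r', r ≤ r' → r' < rows → ∀ c, -rows ≤ c → c < rows + 1 →
          (x + r', y + c) ∈ positions) := by
  intro n
  induction n with
  | zero =>
      intro r hn
      rw [pvLoopR, if_neg (by omega)]
      simp only [true_iff]
      intro r' h1 h2; omega
  | succ n ih =>
      intro r hn
      rw [pvLoopR]
      by_cases h1 : r < rows
      · rw [if_pos h1]
        by_cases h2 : pvLoopC positions x y r (-rows) (rows + 1) = true
        · rw [if_pos h2, ih (r + 1) (by omega)]
          rw [pvLoopC_iff positions x y r (rows + 1 - -rows).toNat (-rows) (rows + 1) (le_refl _)] at h2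
          constructor
          · intro h r' hr1 hr2 c hc1 hc2
            rcases eq_or_lt_of_le hr1 with rfl | hlt
            · exact h2 c hc1 hc2
            · exact h r' (by omega) hr2 c hc1 hc2
          · intro h r' hr1 hr2 c hc1 hc2
            exact h r' (by omega) hr2 c hc1 hc2
        · rw [if_neg h2]
          rw [pvLoopC_iff positions x y r (rows + 1 - -rows).toNat (-rows) (rows + 1) (le_refl _)] at h2
          simp only [Bool.false_eq_true, false_iff]
          intro h
          exact h2 (fun c hc1 hc2 => h r (le_refl r) h1 c hc1 hc2)
      · rw [if_neg h1]
        simp only [true_iff]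
        intro r' hr1 hr2; omega

-- A's per-candidate condition = "every cell of the rectangle is occupied"
lemma pvA_cond_iff (positions : List (Int × Int)) (rows x y : Int) :
    pvLoopR positions rows x y 1 = true ↔
      ∀ q, pvInRect x y rows q → q ∈ positions := by
  rw [pvLoopR_iff positions rows x y (rows - 1).toNat 1 (le_refl _)]
  constructor
  · intro h q hq
    obtain ⟨h1, h2, h3, h4⟩ := hq
    have := h (q.1 - x) (by omega) (by omega) (q.2 - y) (by omega) (by omega)
    simpa using this
  · intro h r hr1 hr2 c hc1 hc2
    exact h (x + r, y + c) ⟨by omega, by omega, by omega, by omega⟩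

lemma pvFoldl_count (P : (Int × Int) → Prop) [DecidablePred P]
    (l : List (Int × Int)) (init : Int) :
    List.foldl (fun acc q => if P q then acc + 1 else acc) init l
      = init + (l.countP (fun q => decide (P q)) : Int) := by
  induction l generalizing init with
  | nil => simp
  | cons q l ih =>
      by_cases h : P q
      · simp only [List.foldl_cons, List.countP_cons, if_pos h, h, decide_true, ih]
        push_cast; ring
      · simp only [List.foldl_cons, List.countP_cons, if_neg h, h, decide_false, ih]
        push_cast; ring

-- the pigeonhole: the count of distinct occupied points in the rectangle equals
-- its area iff every cell of the rectangle is occupied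
lemma pvCount_iff (positions : List (Int × Int)) (rows x y : Int) :
    (((PySem.Set.ofList positions : List (Int × Int)).countP
        (fun q => decide (x + 1 ≤ q.1 ∧ q.1 ≤ x + rows - 1 ∧ y - rows ≤ q.2 ∧ q.2 ≤ y + rows)) : Int)
      = max (rows - 1) 0 * max (2 * rows + 1) 0) ↔
    ∀ q, pvInRect x y rows q → q ∈ positions := by
  set pts : List (Int × Int) := PySem.Set.ofList positions with hpts
  have hnd : pts.Nodup := PySem.Set.nodup_ofList positions
  have hmem : ∀ q, q ∈ pts ↔ q ∈ positions := fun q => PySem.Set.mem_ofList positions q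
  have hcount : pts.countP (fun q => decide (x + 1 ≤ q.1 ∧ q.1 ≤ x + rows - 1 ∧ y - rows ≤ q.2 ∧ q.2 ≤ y + rows))
      = (pts.toFinset.filter (pvInRect x y rows)).card := by
    rw [List.countP_eq_length_filter]
    rw [← List.toFinset_card_of_nodup (hnd.filter _)]
    congr 1
    ext q
    simp [List.mem_filter, pvInRect]
  have hsub : pts.toFinset.filter (pvInRect x y rows) ⊆ pvRect x y rows := by
    intro q hq
    rw [Finset.mem_filter] at hq
    exact (pvMem_rect x y rows q).mpr hq.2
  rw [hcount, ← pvRect_card x y rows, Nat.cast_inj]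
  constructor
  · intro h q hq
    have heq := Finset.eq_of_subset_of_card_le hsub (le_of_eq h.symm)
    have : q ∈ pts.toFinset.filter (pvInRect x y rows) := by
      rw [heq]; exact (pvMem_rect x y rows q).mpr hq
    rw [Finset.mem_filter, List.mem_toFinset, hmem] at this
    exact this.1
  · intro h
    congr 1
    apply Finset.Subset.antisymm hsub
    intro q hq
    rw [pvMem_rect] at hq
    rw [Finset.mem_filter, List.mem_toFinset, hmem]
    exact ⟨h q hq, hq⟩

lemma pvAny_congr (l : List (Int × Int)) (f g : (Int × Int) → Bool)
    (h : ∀ p ∈ l, f p = g p) : l.any f = l.any g := by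
  induction l with
  | nil => rfl
  | cons p l ih =>
      simp only [List.any_cons, h p (by simp), ih (fun q hq => h q (by simp [hq]))]

lemma pvGoA_any (positions : List (Int × Int)) (rows : Int) (l : List (Int × Int)) :
    pvGoA positions rows l
      = l.any (fun p => pvLoopR positions rows p.1 p.2 1) := by
  induction l with
  | nil => rfl
  | cons p l ih =>
      simp only [pvGoA, List.any_cons, ih]
      split_ifs with h <;> simp [h]

-- ===== VERDICT (by name: the statement is the Claim_ definition above) =====
theorem find_top_spec : Claim_equal_find_top := by
  intro positions rows _
  show find_top positions rows = find_top_alt positions rows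
  simp only [find_top, find_top_alt]
  rw [pvGoA_any]
  apply pvAny_congr
  intro p _
  rw [Bool.eq_iff_iff]
  simp only [beq_iff_eq]
  rw [pvA_cond_iff,
    pvFoldl_count (fun q => p.1 + 1 ≤ q.1 ∧ q.1 ≤ p.1 + rows - 1 ∧ p.2 - rows ≤ q.2 ∧ q.2 ≤ p.2 + rows),
    zero_add]
  exact (pvCount_iff positions rows p.1 p.2).symm
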